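-- pv_equiv track=rewrite | github.com/yi559/ntut | Python/homework/homework035.py | solve
-- ===== SOURCE A (Python) =====
-- def solve(data: str, idx: int):
--     if idx == len(data):
--         return [data[idx-1]]  # 回傳最後一個數字
--
--     ops = ["+", "-", "*", ""]
--     results = []
--     for op in ops:
--         if op == "":
--             if data[idx-1] == "0":
--                 continue
--
--         part = data[idx-1] + op
--         tails = solve(data, idx+1)
--
--         for t in tails:
--             results.append(part + t)
--
--     return results
-- ===== SOURCE B (Python) =====
-- from itertools import product
--
--
-- def solve(data: str, idx: int):
--     seq = [data[i - 1] for i in range(idx, len(data) + 1)]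
--     out = []
--     for combo in product(["+", "-", "*", ""], repeat=len(seq) - 1):
--         if any(op == "" and left == "0" for op, left in zip(combo, seq)):
--             continue
--         out.append("".join(d + o for d, o in zip(seq, combo + ("",))))
--     return out
-- ===== Notes on version B (the rewrite author's own statement) =====
-- stated objective: idiomatic
-- what changed: Replaces A's 4-way DFS recursion over positions by a single itertools.product enumeration of the operator combination for each gap, filtering combinations that would glue a digit onto a leading '0' and joining each surviving combination in one pass.
import Mathlib
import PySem

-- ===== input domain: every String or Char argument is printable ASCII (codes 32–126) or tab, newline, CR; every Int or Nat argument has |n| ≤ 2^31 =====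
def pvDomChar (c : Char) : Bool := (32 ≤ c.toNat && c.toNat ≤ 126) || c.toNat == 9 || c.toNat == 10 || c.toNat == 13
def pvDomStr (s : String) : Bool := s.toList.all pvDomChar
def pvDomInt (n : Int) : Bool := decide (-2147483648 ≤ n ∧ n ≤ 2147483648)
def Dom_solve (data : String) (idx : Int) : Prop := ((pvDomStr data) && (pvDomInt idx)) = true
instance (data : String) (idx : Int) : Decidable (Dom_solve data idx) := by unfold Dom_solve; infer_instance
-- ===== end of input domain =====

-- B replaces A's 4-way DFS recursion by a single itertools.product enumeration of the
-- operator combinations for the gaps (idiomatic, same cost); return values only, no mutation.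

-- ===== PORT A =====
-- data[idx-1] as a 1-character string (char list); Pre_ keeps pyGet? within range, so .elim [] is never the raising case
def pvD (s : List Char) (idx : Int) : List Char :=
  (PySem.List.pyGet? s (idx - 1)).elim [] (fun c => [c])

def pvOps : List (List Char) := [['+'], ['-'], ['*'], []]

def solveA (s : List Char) (idx : Int) : List (List Char) :=
  if idx = (s.length : Int) then
    [pvD s idx]
  else if _h : idx < (s.length : Int) then
    pvOps.foldl (fun results op =>
      if op == ([] : List Char) && pvD s idx == ['0'] then results
      else results ++ (solveA s (idx + 1)).map (fun t => (pvD s idx ++ op) ++ t)) []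
  else []  -- Python raises IndexError here (idx > len); excluded by Pre_
termination_by ((s.length : Int) - idx).toNat
decreasing_by omega

def solve (data : String) (idx : Int) : List String :=
  (solveA data.toList idx).map String.ofList

-- ===== PORT B =====
-- product(["+","-","*",""], repeat=n), first component varying slowest (itertools order)
def pvCombos : Nat → List (List (List Char))
  | 0 => [[]]
  | n + 1 => pvOps.flatMap (fun o => (pvCombos n).map (fun c => o :: c))

-- seq = [data[i-1] for i in range(idx, len(data)+1)]
def pvSeq (s : List Char) (idx : Int) : List (List Char) :=
  (PySem.List.pyRange idx ((s.length : Int) + 1) 1).map (fun i => pvD s i)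

-- any(op == "" and left == "0" for op, left in zip(combo, seq))
def pvBad (seq : List (List Char)) (c : List (List Char)) : Bool :=
  (c.zip seq).any (fun p => p.1 == ([] : List Char) && p.2 == ['0'])

-- "".join(d + o for d, o in zip(seq, combo + ("",)))
def pvJoin (seq : List (List Char)) (c : List (List Char)) : List Char :=
  ((seq.zip (c ++ [([] : List Char)])).map (fun p => p.1 ++ p.2)).flatten

def solve_alt (data : String) (idx : Int) : List String :=
  let s := data.toList
  let seq := pvSeq s idx
  ((pvCombos (seq.length - 1)).filter (fun c => !pvBad seq c)).map
    (fun c => String.ofList (pvJoin seq c))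

-- ===== PRECONDITION & SPEC =====
-- Pre_: exactly the inputs where Python A returns (outside it A raises IndexError:
-- idx > len(data), or idx-1 walks below -len(data); B raises there too).
def Pre_solve (data : String) (idx : Int) : Prop :=
  1 - (data.length : Int) ≤ idx ∧ idx ≤ (data.length : Int)
instance (data : String) (idx : Int) : Decidable (Pre_solve data idx) := by unfold Pre_solve; infer_instance

def pvWitness_solve : String × Int := ("1205", 1)

def Spec_solve (data : String) (idx : Int) (out : List String) : Prop := out = solve_alt data idx
instance (data : String) (idx : Int) (out : List String) : Decidable (Spec_solve data idx out) := by unfold Spec_solve; infer_instance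

-- ===== CLAIM (what is proved, stated in full; the proofs are below) =====
def Claim_equal_solve : Prop := ∀ (data : String) (idx : Int), Dom_solve data idx → Pre_solve data idx → Spec_solve data idx (solve data idx)

-- ===== LEMMAS AND PROOFS =====

lemma pvSeq_single (s : List Char) : pvSeq s (s.length : Int) = [pvD s (s.length : Int)] := by
  unfold pvSeq
  rw [PySem.List.pyRange_one_singleton]
  simp

lemma pvSeq_cons (s : List Char) (idx : Int) (h : idx ≤ (s.length : Int)) :
    pvSeq s idx = pvD s idx :: pvSeq s (idx + 1) := by
  unfold pvSeq
  rw [PySem.List.pyRange_one_cons (by omega : idx < (s.length : Int) + 1)]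
  simp

lemma pvJoin_cons (d o : List Char) (seq c : List (List Char)) :
    pvJoin (d :: seq) (o :: c) = (d ++ o) ++ pvJoin seq c := by
  simp [pvJoin]

lemma pvJoin_nil_single (d : List Char) : pvJoin [d] [] = d := by
  simp [pvJoin]

lemma pvBad_cons (d o : List Char) (seq c : List (List Char)) :
    pvBad (d :: seq) (o :: c) = ((o == ([] : List Char) && d == ['0']) || pvBad seq c) := by
  simp [pvBad]

lemma pvKey (s : List Char) : ∀ (n : Nat) (idx : Int), idx ≤ (s.length : Int) →
    (((s.length : Int) - idx).toNat = n) →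
    solveA s idx = ((pvCombos n).filter (fun c => !pvBad (pvSeq s idx) c)).map
      (fun c => pvJoin (pvSeq s idx) c) := by
  intro n
  induction n with
  | zero =>
    intro idx h1 h2
    have he : idx = (s.length : Int) := by omega
    subst he
    rw [solveA, if_pos rfl, pvSeq_single]
    simp [pvCombos, pvBad, pvJoin_nil_single]
  | succ m ih =>
    intro idx h1 h2
    have hlt : idx < (s.length : Int) := by omega
    have hne : ¬ idx = (s.length : Int) := by omega
    have hIH := ih (idx + 1) (by omega) (by omega)
    rw [solveA, if_neg hne, dif_pos hlt, pvSeq_cons s idx h1]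
    simp only [pvCombos, pvOps, List.flatMap_cons, List.flatMap_nil, List.foldl,
      List.filter_append, List.map_append, List.append_nil,
      List.filter_map, List.map_map]
    rw [hIH]
    simp only [Function.comp_def, pvBad_cons, pvJoin_cons]
    cases pvD s idx == ['0'] with
    | false => simp [Function.comp_def, List.append_assoc]
    | true => simp [Function.comp_def, List.append_assoc]

-- ===== VERDICT (by name: the statement is the Claim_ definition above) =====
theorem solve_spec : Claim_equal_solve := by
  intro data idx _ hpre
  obtain ⟨h1, h2⟩ := hpre
  unfold Spec_solve solve solve_alt
  have hlen : (pvSeq data.toList idx).length - 1 = ((data.toList.length : Int) - idx).toNat := by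
    unfold pvSeq
    rw [List.length_map, PySem.List.length_pyRange_one]
    omega
  rw [pvKey data.toList (((data.toList.length : Int) - idx).toNat) idx (by simpa using h2) rfl]
  simp [hlen, List.map_map, Function.comp]
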